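-- pv_equiv track=rewrite | github.com/makananku/Notepad | notepad_app.py | _get_current_format_state
-- ===== SOURCE A (Python) =====
-- def _get_current_format_state(tags):
--     """Parse current formatting state from tag list"""
--     has_bold = False
--     has_italic = False
--     has_underline = False
--     font_size = None
--
--     for tag in tags:
--         # Check for font size + style compound tags
--         if tag.startswith('font_'):
--             parts = tag.split('_')
--             if len(parts) >= 2 and parts[1].isdigit():
--                 font_size = int(parts[1])
--                 # Check for style in compound tag
--                 if 'bold' in tag:
--                     has_bold = True
--                 if 'italic' in tag:
--                     has_italic = True
--                 if 'underline' in tag: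
--                     has_underline = True
--         # Check for plain style tags
--         elif tag in ['bold', 'bold_italic', 'bold_underline', 'bold_italic_underline']:
--             has_bold = True
--         if tag in ['italic', 'bold_italic', 'italic_underline', 'bold_italic_underline']:
--             has_italic = True
--         if tag in ['underline', 'bold_underline', 'italic_underline', 'bold_italic_underline']:
--             has_underline = True
--
--     return has_bold, has_italic, has_underline, font_size
-- ===== SOURCE B (Python) =====
-- # B: three independent passes (filter valid font tags once, then membership / substring anys)
-- # instead of A's single fused state-machine loop.
-- BOLD_SET = {'bold', 'bold_italic', 'bold_underline', 'bold_italic_underline'}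
-- ITALIC_SET = {'italic', 'bold_italic', 'italic_underline', 'bold_italic_underline'}
-- UNDERLINE_SET = {'underline', 'bold_underline', 'italic_underline', 'bold_italic_underline'}
--
--
-- def _get_current_format_state(tags):
--     valid_font = [t for t in tags
--                   if t.startswith('font_') and t.split('_')[1].isdigit()]
--     font_size = int(valid_font[-1].split('_')[1]) if valid_font else None
--     has_bold = any('bold' in t for t in valid_font) or any(t in BOLD_SET for t in tags)
--     has_italic = any('italic' in t for t in valid_font) or any(t in ITALIC_SET for t in tags)
--     has_underline = any('underline' in t for t in valid_font) or any(t in UNDERLINE_SET for t in tags)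
--     return has_bold, has_italic, has_underline, font_size
-- ===== Notes on version B (the rewrite author's own statement) =====
-- stated objective: alternative
-- what changed: Replaced A's single fused loop that threads four mutable flags through compound branch logic with independent passes: one filter collecting the valid font tags (last one gives font_size), then per-flag any() passes combining a substring scan over the valid font tags with an exact set-membership scan over all tags.
import Mathlib
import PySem

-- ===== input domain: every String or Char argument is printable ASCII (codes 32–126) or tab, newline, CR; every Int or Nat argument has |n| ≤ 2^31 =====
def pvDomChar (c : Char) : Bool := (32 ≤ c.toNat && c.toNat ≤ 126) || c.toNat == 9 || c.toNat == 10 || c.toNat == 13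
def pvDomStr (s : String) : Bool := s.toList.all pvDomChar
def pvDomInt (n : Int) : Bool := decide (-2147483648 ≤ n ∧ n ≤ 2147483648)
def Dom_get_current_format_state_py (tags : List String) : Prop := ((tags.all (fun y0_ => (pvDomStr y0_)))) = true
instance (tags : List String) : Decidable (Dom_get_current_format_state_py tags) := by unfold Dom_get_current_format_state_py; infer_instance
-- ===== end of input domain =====

-- B replaces A's single fused state-machine loop by independent passes (filter the valid
-- font tags once, then per-flag `any` passes and a last-element lookup); objective: alternative decomposition.


-- ===== PORT A =====
-- one iteration of A's loop body over the state (has_bold, has_italic, has_underline, font_size)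
def pyStepA (st : Bool × Bool × Bool × Option Int) (tag : String) : Bool × Bool × Bool × Option Int :=
  let b := st.1; let i := st.2.1; let u := st.2.2.1; let fs := st.2.2.2
  let (b, i, u, fs) :=
    if PySem.Str.startswith tag "font_" then
      let parts := (PySem.Str.split? tag "_").getD []   -- sep "_" ≠ "": Python's split never raises here
      if 2 ≤ parts.length && PySem.Str.strIsdigit (parts.getD 1 "") then
        -- parts[1] guarded by the length test; int(parts[1]) guarded by isdigit, so the getD defaults are never taken
        let fs := some ((PySem.Int.ofStr? (parts.getD 1 "")).getD 0)
        let b := if PySem.Str.isIn "bold" tag then true else b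
        let i := if PySem.Str.isIn "italic" tag then true else i
        let u := if PySem.Str.isIn "underline" tag then true else u
        (b, i, u, fs)
      else (b, i, u, fs)
    else
      let b := if ["bold", "bold_italic", "bold_underline", "bold_italic_underline"].contains tag then true else b
      (b, i, u, fs)
  let i := if ["italic", "bold_italic", "italic_underline", "bold_italic_underline"].contains tag then true else i
  let u := if ["underline", "bold_underline", "italic_underline", "bold_italic_underline"].contains tag then true else u
  (b, i, u, fs)

def get_current_format_state_py (tags : List String) : Bool × Bool × Bool × Option Int :=
  tags.foldl pyStepA (false, false, false, none)

-- ===== PORT B =====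
def pvBoldSet : PySem.Set String := PySem.Set.ofList ["bold", "bold_italic", "bold_underline", "bold_italic_underline"]
def pvItalicSet : PySem.Set String := PySem.Set.ofList ["italic", "bold_italic", "italic_underline", "bold_italic_underline"]
def pvUnderlineSet : PySem.Set String := PySem.Set.ofList ["underline", "bold_underline", "italic_underline", "bold_italic_underline"]

-- t.split('_')[1]: whenever B evaluates it, t starts with 'font_', so index 1 exists (getD never taken)
def pvPart1 (t : String) : String := ((PySem.Str.split? t "_").getD []).getD 1 ""
def pvValidFont (t : String) : Bool := PySem.Str.startswith t "font_" && PySem.Str.strIsdigit (pvPart1 t)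
def pvFontNum (t : String) : Int := (PySem.Int.ofStr? (pvPart1 t)).getD 0   -- int(...) guarded by isdigit

def get_current_format_state_py_alt (tags : List String) : Bool × Bool × Bool × Option Int :=
  let validFont := tags.filter pvValidFont
  -- valid_font[-1] guarded by the emptiness test
  let fontSize : Option Int :=
    match PySem.List.pyGet? validFont (-1) with
    | some t => some (pvFontNum t)
    | none => none
  let hasBold := validFont.any (fun t => PySem.Str.isIn "bold" t) || tags.any (fun t => pvBoldSet.contains t)
  let hasItalic := validFont.any (fun t => PySem.Str.isIn "italic" t) || tags.any (fun t => pvItalicSet.contains t)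
  let hasUnderline := validFont.any (fun t => PySem.Str.isIn "underline" t) || tags.any (fun t => pvUnderlineSet.contains t)
  (hasBold, hasItalic, hasUnderline, fontSize)

-- ===== PRECONDITION & SPEC =====
def Spec_get_current_format_state_py (tags : List String) (out : Bool × Bool × Bool × Option Int) : Prop := out = get_current_format_state_py_alt tags
instance (tags : List String) (out : Bool × Bool × Bool × Option Int) : Decidable (Spec_get_current_format_state_py tags out) := by unfold Spec_get_current_format_state_py; infer_instance

-- ===== CLAIM (what is proved, stated in full; the proofs are below) =====
def Claim_equal_get_current_format_state_py : Prop := ∀ (tags : List String), Dom_get_current_format_state_py tags → Spec_get_current_format_state_py tags (get_current_format_state_py tags)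

-- ===== LEMMAS AND PROOFS =====

-- running font_size value of A's loop: last valid font tag wins, else the incoming value
def pvLastFS (tags : List String) (fs : Option Int) : Option Int :=
  match tags with
  | [] => fs
  | t :: rest => pvLastFS rest (if pvValidFont t then some (pvFontNum t) else fs)

lemma pvIteOr (c b : Bool) : (if c = true then true else b) = (c || b) := by
  cases c <;> simp

lemma pvPyGet_neg_one (xs : List String) : PySem.List.pyGet? xs (-1) = xs.getLast? := by
  cases xs with
  | nil => decide
  | cons a l => simp [PySem.List.pyGet?, PySem.List.pyIdx?, List.getLast?_eq_getElem?]

lemma pvLastFS_eq (tags : List String) (fs : Option Int) :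
    pvLastFS tags fs =
      match (tags.filter pvValidFont).getLast? with
      | some t => some (pvFontNum t)
      | none => fs := by
  induction tags generalizing fs with
  | nil => rfl
  | cons t rest ih =>
      show pvLastFS rest (if pvValidFont t then some (pvFontNum t) else fs) = _
      rw [List.filter_cons]
      by_cases h : pvValidFont t = true
      · rw [if_pos h, if_pos (by simp [h]), ih, List.getLast?_cons]
        cases hr : (rest.filter pvValidFont).getLast? <;> simp
      · rw [if_neg h, if_neg (by simp [h]), ih]

lemma pvSet_contains_eq_bold (t : String) :
    pvBoldSet.contains t = ["bold", "bold_italic", "bold_underline", "bold_italic_underline"].contains t := by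
  simp [pvBoldSet, PySem.Set.ofList, PySem.Set.contains, PySem.Set.add]

lemma pvSet_contains_eq_italic (t : String) :
    pvItalicSet.contains t = ["italic", "bold_italic", "italic_underline", "bold_italic_underline"].contains t := by
  simp [pvItalicSet, PySem.Set.ofList, PySem.Set.contains, PySem.Set.add]

lemma pvSet_contains_eq_underline (t : String) :
    pvUnderlineSet.contains t = ["underline", "bold_underline", "italic_underline", "bold_italic_underline"].contains t := by
  simp [pvUnderlineSet, PySem.Set.ofList, PySem.Set.contains, PySem.Set.add]

-- none of the twelve canonical plain style tags starts with 'font_'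
lemma pvBold_not_font (t : String) (hs : PySem.Str.startswith t "font_" = true) :
    ["bold", "bold_italic", "bold_underline", "bold_italic_underline"].contains t = false := by
  by_cases hm : t ∈ ["bold", "bold_italic", "bold_underline", "bold_italic_underline"]
  · exact absurd hs (by fin_cases hm <;> decide)
  · simpa using hm

lemma pvItalic_not_font (t : String) (hs : PySem.Str.startswith t "font_" = true) :
    ["italic", "bold_italic", "italic_underline", "bold_italic_underline"].contains t = false := by
  by_cases hm : t ∈ ["italic", "bold_italic", "italic_underline", "bold_italic_underline"]
  · exact absurd hs (by fin_cases hm <;> decide)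
  · simpa using hm

lemma pvUnderline_not_font (t : String) (hs : PySem.Str.startswith t "font_" = true) :
    ["underline", "bold_underline", "italic_underline", "bold_italic_underline"].contains t = false := by
  by_cases hm : t ∈ ["underline", "bold_underline", "italic_underline", "bold_italic_underline"]
  · exact absurd hs (by fin_cases hm <;> decide)
  · simpa using hm

-- A's fused font condition coincides with B's pvValidFont
lemma pvCond_eq (t : String) :
    (PySem.Str.startswith t "font_" &&
      (decide (2 ≤ ((PySem.Str.split? t "_").getD []).length) &&
        PySem.Str.strIsdigit (((PySem.Str.split? t "_").getD []).getD 1 ""))) = pvValidFont t := by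
  by_cases hl : 2 ≤ ((PySem.Str.split? t "_").getD []).length
  · simp [pvValidFont, pvPart1, hl]
  · have h1 : ((PySem.Str.split? t "_").getD []).getD 1 "" = "" := by
      rw [List.getD_eq_getElem?_getD, List.getElem?_eq_none (by omega)]
      rfl
    have h2 : PySem.Str.strIsdigit "" = false := by decide
    simp only [pvValidFont, pvPart1, h1, h2]
    simp [hl]

-- the three shapes of A's loop body
lemma pvStep_font_valid (b i u : Bool) (fs : Option Int) (t : String)
    (hs : PySem.Str.startswith t "font_" = true)
    (hd : (decide (2 ≤ ((PySem.Str.split? t "_").getD []).length) &&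
        PySem.Str.strIsdigit (((PySem.Str.split? t "_").getD []).getD 1 "")) = true) :
    pyStepA (b, i, u, fs) t =
      (PySem.Str.isIn "bold" t || b, PySem.Str.isIn "italic" t || i,
       PySem.Str.isIn "underline" t || u, some (pvFontNum t)) := by
  simp only [pyStepA]
  rw [if_pos hs, if_pos hd]
  simp only [pvItalic_not_font t hs, pvUnderline_not_font t hs, pvIteOr, pvFontNum, pvPart1]
  simp

lemma pvStep_font_invalid (b i u : Bool) (fs : Option Int) (t : String)
    (hs : PySem.Str.startswith t "font_" = true)
    (hd : (decide (2 ≤ ((PySem.Str.split? t "_").getD []).length) &&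
        PySem.Str.strIsdigit (((PySem.Str.split? t "_").getD []).getD 1 "")) = false) :
    pyStepA (b, i, u, fs) t = (b, i, u, fs) := by
  simp only [pyStepA]
  rw [if_pos hs, if_neg (by rw [hd]; decide)]
  simp only [pvItalic_not_font t hs, pvUnderline_not_font t hs, pvIteOr]
  simp

lemma pvStep_plain (b i u : Bool) (fs : Option Int) (t : String)
    (hs : PySem.Str.startswith t "font_" = false) :
    pyStepA (b, i, u, fs) t =
      (["bold", "bold_italic", "bold_underline", "bold_italic_underline"].contains t || b,
       ["italic", "bold_italic", "italic_underline", "bold_italic_underline"].contains t || i,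
       ["underline", "bold_underline", "italic_underline", "bold_italic_underline"].contains t || u,
       fs) := by
  simp only [pyStepA]
  rw [if_neg (by rw [hs]; decide)]
  simp only [pvIteOr]

lemma pvOrA (a b x y : Bool) : (a || b || (x || y)) = (b || ((a || x) || y)) := by
  cases a <;> cases b <;> cases x <;> cases y <;> rfl

lemma pvOrB (a b x y : Bool) : (a || b || (x || y)) = (b || (x || (a || y))) := by
  cases a <;> cases b <;> cases x <;> cases y <;> rfl

lemma pvLoop_char (tags : List String) (b i u : Bool) (fs : Option Int) :
    tags.foldl pyStepA (b, i, u, fs) =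
      (b || ((tags.filter pvValidFont).any (fun t => PySem.Str.isIn "bold" t)
              || tags.any (fun t => ["bold", "bold_italic", "bold_underline", "bold_italic_underline"].contains t)),
       i || ((tags.filter pvValidFont).any (fun t => PySem.Str.isIn "italic" t)
              || tags.any (fun t => ["italic", "bold_italic", "italic_underline", "bold_italic_underline"].contains t)),
       u || ((tags.filter pvValidFont).any (fun t => PySem.Str.isIn "underline" t)
              || tags.any (fun t => ["underline", "bold_underline", "italic_underline", "bold_italic_underline"].contains t)),
       pvLastFS tags fs) := by
  induction tags generalizing b i u fs with
  | nil => simp [pvLastFS]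
  | cons t rest ih =>
      rw [List.foldl_cons]
      by_cases hs : PySem.Str.startswith t "font_" = true
      · by_cases hv : pvValidFont t = true
        · have hd : (decide (2 ≤ ((PySem.Str.split? t "_").getD []).length) &&
              PySem.Str.strIsdigit (((PySem.Str.split? t "_").getD []).getD 1 "")) = true := by
            have hc := pvCond_eq t
            rw [hv, hs] at hc; simpa using hc
          rw [pvStep_font_valid b i u fs t hs hd, ih]
          show _ = (_, _, _, pvLastFS rest (if pvValidFont t then some (pvFontNum t) else fs))
          rw [if_pos hv]
          simp only [List.filter_cons, hv, if_true, List.any_cons,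
            pvBold_not_font t hs, pvItalic_not_font t hs, pvUnderline_not_font t hs, Bool.false_or]
          simp only [pvOrA]
        · have hd : (decide (2 ≤ ((PySem.Str.split? t "_").getD []).length) &&
              PySem.Str.strIsdigit (((PySem.Str.split? t "_").getD []).getD 1 "")) = false := by
            have hv' : pvValidFont t = false := by revert hv; cases pvValidFont t <;> simp
            have hc := pvCond_eq t
            rw [hs] at hc
            simpa [hv'] using hc
          rw [pvStep_font_invalid b i u fs t hs hd, ih]
          show _ = (_, _, _, pvLastFS rest (if pvValidFont t then some (pvFontNum t) else fs))
          rw [if_neg hv]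
          simp only [List.filter_cons, hv, if_false, Bool.false_eq_true, List.any_cons,
            pvBold_not_font t hs, pvItalic_not_font t hs, pvUnderline_not_font t hs, Bool.false_or]
      · have hs' : PySem.Str.startswith t "font_" = false := by
          rw [Bool.eq_false_iff]; exact hs
        have hv : pvValidFont t = false := by
          rw [pvValidFont, hs']; rfl
        rw [pvStep_plain b i u fs t hs', ih]
        show _ = (_, _, _, pvLastFS rest (if pvValidFont t then some (pvFontNum t) else fs))
        rw [if_neg (by simp [hv])]
        simp only [List.filter_cons, hv, if_false, Bool.false_eq_true, List.any_cons]
        simp only [pvOrB]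

-- ===== VERDICT (by name: the statement is the Claim_ definition above) =====
theorem get_current_format_state_py_spec : Claim_equal_get_current_format_state_py := by
  intro tags _
  show get_current_format_state_py tags = get_current_format_state_py_alt tags
  rw [get_current_format_state_py, pvLoop_char]
  simp only [get_current_format_state_py_alt, pvPyGet_neg_one, pvLastFS_eq,
    pvSet_contains_eq_bold, pvSet_contains_eq_italic, pvSet_contains_eq_underline,
    Bool.false_or]
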